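-- pv_equiv track=rewrite | github.com/tha-hammer/CodeWriter9.0 | sessions/gwt-0052_attempt2.py | _in_trait
-- ===== SOURCE A (Python) =====
-- def _in_trait(k: int, lines: list) -> bool:
--     """TLA+ InTrait(k): true iff line k sits inside an open trait block."""
--     for j in range(1, k):
--         if lines[j - 1] == "TraitOpen":
--             has_close = any(
--                 lines[m - 1] == "CloseBrace"
--                 for m in range(j + 1, k)
--             )
--             if not has_close:
--                 return True
--     return False
-- ===== SOURCE B (Python) =====
-- def _in_trait(k: int, lines: list) -> bool:
--     """TLA+ InTrait(k): true iff line k sits inside an open trait block.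
--
--     Single left-to-right pass over the first k-1 lines: the block is open
--     exactly when the last marker seen is a "TraitOpen" (any "CloseBrace"
--     after it closes the block)."""
--     open_ = False
--     for line in lines[: max(k - 1, 0)]:
--         if line == "TraitOpen":
--             open_ = True
--         elif line == "CloseBrace":
--             open_ = False
--     return open_
-- ===== Notes on version B (the rewrite author's own statement) =====
-- stated objective: simpler
-- what changed: Replaced the per-candidate inner scan for a later CloseBrace by one linear pass that tracks whether the last marker among the first k-1 lines is a TraitOpen.
-- crash fix: On inputs with k >= len(lines)+2 A raises IndexError (it indexes past the end of lines) while B simply scans all available lines and returns the current open/closed state. — e.g. on _in_trait(3, ["TraitOpen"]): A raises IndexError, B returns true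
import Mathlib
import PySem

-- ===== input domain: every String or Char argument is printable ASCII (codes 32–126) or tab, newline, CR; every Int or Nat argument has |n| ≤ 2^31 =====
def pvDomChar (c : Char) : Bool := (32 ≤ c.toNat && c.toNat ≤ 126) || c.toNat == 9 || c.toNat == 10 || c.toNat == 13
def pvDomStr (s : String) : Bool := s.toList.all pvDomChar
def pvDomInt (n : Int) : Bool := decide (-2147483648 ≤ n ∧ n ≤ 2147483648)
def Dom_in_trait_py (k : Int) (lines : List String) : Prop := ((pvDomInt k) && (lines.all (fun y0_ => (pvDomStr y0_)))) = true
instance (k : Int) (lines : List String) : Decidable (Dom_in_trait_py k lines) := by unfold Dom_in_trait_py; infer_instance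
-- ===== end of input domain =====

-- B replaces A's per-candidate inner scan by one linear pass tracking the last marker seen (objective: simpler).

-- ===== PORT A =====
-- 'any(lines[m-1] == "CloseBrace" for m in range(j+1, k))'
def pvAnyClose (k : Int) (lines : List String) (j : Int) : Bool :=
  (PySem.List.pyRange (j + 1) k 1).any
    (fun m => (PySem.List.pyGetD lines (m - 1) "") == "CloseBrace")

-- the 'for j in range(1, k)' loop with its early return
def pvTraitGo (k : Int) (lines : List String) : List Int → Bool
  | [] => false
  | j :: rest =>
      if (PySem.List.pyGetD lines (j - 1) "") == "TraitOpen" then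
        if pvAnyClose k lines j then pvTraitGo k lines rest else true
      else pvTraitGo k lines rest

def in_trait_py (k : Int) (lines : List String) : Bool :=
  pvTraitGo k lines (PySem.List.pyRange 1 k 1)

-- ===== PORT B =====
def pvStep (st : Bool) (line : String) : Bool :=
  if line == "TraitOpen" then true
  else if line == "CloseBrace" then false
  else st

def in_trait_py_alt (k : Int) (lines : List String) : Bool :=
  (PySem.List.slice lines none (some (max (k - 1) 0))).foldl pvStep false

-- ===== PRECONDITION & SPEC =====
-- A raises IndexError exactly when k ≥ lines.length + 2 (the loop, or the inner any, reads past the end).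
def Pre_in_trait_py (k : Int) (lines : List String) : Prop := k ≤ (lines.length : Int) + 1
instance (k : Int) (lines : List String) : Decidable (Pre_in_trait_py k lines) := by unfold Pre_in_trait_py; infer_instance
def pvWitness_in_trait_py : Int × List String := (3, ["TraitOpen", "x"])

-- On inputs with k ≥ lines.length + 2, A raises IndexError while B just scans the whole list and returns the open/closed state.
def Raises_in_trait_py (k : Int) (lines : List String) : Prop := (lines.length : Int) + 1 < k
instance (k : Int) (lines : List String) : Decidable (Raises_in_trait_py k lines) := by unfold Raises_in_trait_py; infer_instance
def pvRaiseWitness_in_trait_py : Int × List String := (3, ["TraitOpen"])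
def pvRaiseWitnessOut_in_trait_py : Bool := true

def Spec_in_trait_py (k : Int) (lines : List String) (out : Bool) : Prop := out = in_trait_py_alt k lines
instance (k : Int) (lines : List String) (out : Bool) : Decidable (Spec_in_trait_py k lines out) := by unfold Spec_in_trait_py; infer_instance

-- ===== CLAIM (what is proved, stated in full; the proofs are below) =====
def Claim_equal_in_trait_py : Prop := ∀ (k : Int) (lines : List String), Dom_in_trait_py k lines → Pre_in_trait_py k lines → Spec_in_trait_py k lines (in_trait_py k lines)
def Claim_raises_in_trait_py : Prop := (∀ (k : Int) (lines : List String), Dom_in_trait_py k lines → Raises_in_trait_py k lines → ¬ Pre_in_trait_py k lines) ∧ (Dom_in_trait_py (pvRaiseWitness_in_trait_py.1) (pvRaiseWitness_in_trait_py.2) ∧ Raises_in_trait_py (pvRaiseWitness_in_trait_py.1) (pvRaiseWitness_in_trait_py.2) ∧ in_trait_py_alt (pvRaiseWitness_in_trait_py.1) (pvRaiseWitness_in_trait_py.2) = pvRaiseWitnessOut_in_trait_py)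

-- ===== LEMMAS AND PROOFS =====

def pvStepA (k : Int) (lines : List String) (j : Int) : Bool :=
  ((PySem.List.pyGetD lines (j - 1) "") == "TraitOpen") && !pvAnyClose k lines j

-- A's early-return loop is an 'any' over the candidate positions.
theorem pvTraitGo_eq_any (k : Int) (lines : List String) (l : List Int) :
    pvTraitGo k lines l = l.any (pvStepA k lines) := by
  induction l with
  | nil => rfl
  | cons j rest ih =>
      simp only [pvTraitGo, pvStepA, List.any_cons, ih]
      by_cases h1 : (PySem.List.pyGetD lines (j - 1) "") == "TraitOpen" <;>
        by_cases h2 : pvAnyClose k lines j <;> simp [h1, h2]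

theorem pv_any_congr {α : Type} (f g : α → Bool) (l : List α)
    (h : ∀ a ∈ l, f a = g a) : l.any f = l.any g := by
  induction l with
  | nil => rfl
  | cons x xs ih =>
      simp only [List.any_cons, h x (List.mem_cons_self), ih (fun a ha => h a (List.mem_cons_of_mem _ ha))]

-- main induction: for a prefix of m lines (m ≤ length), A's any equals B's fold
theorem pv_main (m : Nat) : ∀ (lines : List String), m ≤ lines.length →
    (PySem.List.pyRange 1 ((m : Int) + 1) 1).any (pvStepA ((m : Int) + 1) lines)
      = (lines.take m).foldl pvStep false := by
  induction m with
  | zero =>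
      intro lines _
      rw [PySem.List.pyRange_one_eq_nil (by omega)]
      rfl
  | succ m ih =>
      intro lines hm
      have hmlt : m < lines.length := by omega
      have hx : PySem.List.pyGetD lines (((m : Int) + 1) - 1) "" = lines[m] := by
        have h1 : ((m : Int) + 1) - 1 = (m : Int) := by ring
        rw [h1, PySem.List.pyGetD_natCast]
        simp [List.getD_eq_getElem?_getD, List.getElem?_eq_getElem hmlt]
      -- split the range at the right end
      have hsplit : PySem.List.pyRange 1 (((m : Nat) + 1 : Int) + 1) 1
          = PySem.List.pyRange 1 ((m : Int) + 1) 1 ++ [(m : Int) + 1] := by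
        rw [PySem.List.pyRange_one_succ_right (by omega)]
      -- take (m+1) splits at the right end
      have htake : lines.take (m + 1) = lines.take m ++ [lines[m]] :=
        List.take_succ_eq_append_getElem hmlt
      have hfold : (lines.take (m + 1)).foldl pvStep false
          = pvStep ((lines.take m).foldl pvStep false) lines[m] := by
        rw [htake, List.foldl_append]; rfl
      -- the last candidate j = m+1: its inner any range is empty
      have hlast : pvStepA (((m : Nat) + 1 : Int) + 1) lines ((m : Int) + 1)
          = ((lines[m] == "TraitOpen") : Bool) := by
        simp only [pvStepA, pvAnyClose]
        rw [PySem.List.pyRange_one_eq_nil (by omega), hx]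
        simp
      rw [hfold]
      push_cast at hsplit ⊢
      rw [hsplit, List.any_append, List.any_cons, List.any_nil, hlast]
      -- earlier candidates: their inner any gains the new last element
      have hstep : ∀ j ∈ PySem.List.pyRange 1 ((m : Int) + 1) 1,
          pvStepA (((m : Int) + 1) + 1) lines j
            = (pvStepA ((m : Int) + 1) lines j
              && !((lines[m] == "CloseBrace") : Bool)) := by
        intro j hj
        rw [PySem.List.mem_pyRange_one] at hj
        simp only [pvStepA, pvAnyClose]
        have h2 : PySem.List.pyRange (j + 1) (((m : Int) + 1) + 1) 1
            = PySem.List.pyRange (j + 1) ((m : Int) + 1) 1 ++ [(m : Int) + 1] := by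
          rw [PySem.List.pyRange_one_succ_right (by omega)]
        rw [h2, List.any_append, List.any_cons, List.any_nil, hx]
        cases (PySem.List.pyGetD lines (j - 1) "") == "TraitOpen" <;>
          cases (PySem.List.pyRange (j + 1) ((m : Int) + 1) 1).any
              (fun x => (PySem.List.pyGetD lines (x - 1) "") == "CloseBrace") <;>
          cases (lines[m] == "CloseBrace" : Bool) <;> simp
      rw [pv_any_congr _ _ _ hstep]
      by_cases hTO : lines[m] = "TraitOpen"
      · simp [hTO, pvStep]
      · by_cases hCB : lines[m] = "CloseBrace"
        · have hall : (PySem.List.pyRange 1 ((m : Int) + 1) 1).any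
              (fun j => pvStepA ((m : Int) + 1) lines j && !((lines[m] == "CloseBrace") : Bool)) = false := by
            apply List.any_eq_false.mpr
            intro j _
            simp [hCB]
          rw [hall]
          simp [hCB, pvStep]
        · have : ∀ j ∈ PySem.List.pyRange 1 ((m : Int) + 1) 1,
              (pvStepA ((m : Int) + 1) lines j && !((lines[m] == "CloseBrace") : Bool))
                = pvStepA ((m : Int) + 1) lines j := by
            intro j _; simp [hCB]
          rw [pv_any_congr _ _ _ this, ih lines (by omega)]
          simp [hTO, hCB, pvStep]

-- ===== VERDICT (by name: the statement is the Claim_ definition above) =====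
theorem in_trait_py_spec : Claim_equal_in_trait_py := by
  intro k lines _ hpre
  unfold Spec_in_trait_py in_trait_py in_trait_py_alt Pre_in_trait_py at *
  rw [pvTraitGo_eq_any]
  by_cases hk : k ≤ 1
  · rw [PySem.List.pyRange_one_eq_nil hk]
    have h0 : max (k - 1) 0 = 0 := by omega
    rw [h0, PySem.List.slice_to lines (le_refl 0)]
    rfl
  · set m : Nat := (k - 1).toNat with hmdef
    have hk1 : k = (m : Int) + 1 := by omega
    have hmax : max (k - 1) 0 = (m : Int) := by omega
    rw [hmax, PySem.List.slice_to_natCast, hk1]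
    exact pv_main m lines (by omega)

def in_trait_py_raises : Claim_raises_in_trait_py := by
  unfold Claim_raises_in_trait_py
  constructor
  · intro k lines _ hr hp
    unfold Raises_in_trait_py at hr
    unfold Pre_in_trait_py at hp
    omega
  · exact ⟨by decide, by decide, by decide⟩
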